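-- pv_equiv track=rewrite | github.com/jamesfowkes/arduino-kit | arduino-kit.py | merge_partial_kits
-- ===== SOURCE A (Python) =====
-- from collections import Counter
--
-- def merge_partial_kits(current_stock, partial_kit_contents):
-- 	try:
-- 		partial_kit_count = current_stock.pop('Partial Kits')
-- 	except KeyError:
-- 		return current_stock
--
-- 	new_stock = Counter(current_stock)
-- 	for _ in range(partial_kit_count):
-- 		new_stock += Counter(partial_kit_contents)
--
-- 	return dict(new_stock)
-- ===== SOURCE B (Python) =====
-- from collections import Counter
--
-- def merge_partial_kits(current_stock, partial_kit_contents):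
--     # Add the first kit as-is, then the remaining count-1 kits in a single
--     # scaled Counter addition.  Pops 'Partial Kits' from current_stock in
--     # place, like the original.
--     try:
--         count = current_stock.pop('Partial Kits')
--     except KeyError:
--         return current_stock
--     new_stock = Counter(current_stock)
--     if count > 0:
--         new_stock += Counter(partial_kit_contents)
--     if count > 1:
--         new_stock += Counter({k: (count - 1) * c for k, c in partial_kit_contents.items()})
--     return dict(new_stock)
-- ===== Notes on version B (the rewrite author's own statement) =====
-- stated objective: alternative
-- what changed: Replaces the loop of count repeated Counter additions by at most two Counter additions: one kit added as-is, then the remaining count-1 kits added at once with each content value scaled by count-1; Pre_ only excludes association lists with duplicate keys, which represent no Python dict input.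
import Mathlib
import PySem

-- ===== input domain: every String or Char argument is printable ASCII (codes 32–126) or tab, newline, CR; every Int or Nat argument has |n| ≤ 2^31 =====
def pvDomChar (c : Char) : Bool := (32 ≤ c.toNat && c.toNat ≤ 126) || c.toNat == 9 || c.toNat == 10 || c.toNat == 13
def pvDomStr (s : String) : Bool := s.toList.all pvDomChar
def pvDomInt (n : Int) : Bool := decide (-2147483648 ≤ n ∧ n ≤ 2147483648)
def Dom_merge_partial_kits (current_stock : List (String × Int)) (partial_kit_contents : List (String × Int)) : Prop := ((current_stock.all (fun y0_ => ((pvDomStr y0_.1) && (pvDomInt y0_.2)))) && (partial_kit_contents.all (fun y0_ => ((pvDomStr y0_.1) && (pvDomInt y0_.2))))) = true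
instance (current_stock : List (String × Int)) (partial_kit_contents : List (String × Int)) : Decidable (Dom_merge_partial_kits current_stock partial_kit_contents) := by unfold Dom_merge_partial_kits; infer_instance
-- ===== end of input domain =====

-- B replaces A's loop of `count` Counter additions by at most two Counter additions (the first
-- kit as-is, then the remaining count-1 kits at once with the values scaled by count-1); both
-- versions pop 'Partial Kits' from the stock dict in place (the Lean ports are pure, the
-- equivalence is about the return value).

-- ===== PORT A =====
-- `new_stock += Counter(other)`: Counter.update (add value, new keys append)
-- followed by Counter's positive filter (in-place operators drop non-positive entries, order kept).
def pvCounterAdd (st : PySem.Dict String Int) (other : List (String × Int)) : PySem.Dict String Int :=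
  PySem.Dict.mk
    (((other.foldl (fun d kc => d.insert kc.1 (d.getD kc.1 0 + kc.2)) st)).items.filter
      (fun q => decide (0 < q.2)))

def merge_partial_kits (current_stock : List (String × Int)) (partial_kit_contents : List (String × Int)) : List (String × Int) :=
  match (PySem.Dict.mk current_stock).pop? "Partial Kits" with
  | none => current_stock                      -- KeyError: return current_stock
  | some (partial_kit_count, popped) =>
    -- new_stock = Counter(current_stock)  (after the pop)
    let new_stock := popped
    -- for _ in range(partial_kit_count): new_stock += Counter(partial_kit_contents)
    ((PySem.List.pyRange 0 partial_kit_count 1).foldl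
        (fun st _ => pvCounterAdd st partial_kit_contents) new_stock).items

-- ===== PORT B =====
def merge_partial_kits_alt (current_stock : List (String × Int)) (partial_kit_contents : List (String × Int)) : List (String × Int) :=
  match (PySem.Dict.mk current_stock).pop? "Partial Kits" with
  | none => current_stock                      -- KeyError: return current_stock
  | some (count, popped) =>
    -- new_stock = Counter(current_stock)  (after the pop)
    let new_stock := popped
    -- if count > 0: new_stock += Counter(partial_kit_contents)
    let new_stock := if 0 < count then pvCounterAdd new_stock partial_kit_contents else new_stock
    -- if count > 1: new_stock += Counter({k: (count - 1) * c for k, c in partial_kit_contents.items()})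
    let new_stock :=
      if 1 < count then
        pvCounterAdd new_stock
          (PySem.Dict.mk (partial_kit_contents.map (fun q => (q.1, (count - 1) * q.2)))).items
      else new_stock
    new_stock.items

-- ===== PRECONDITION & SPEC =====
-- The Python arguments are dicts, whose keys are distinct; association lists with duplicate
-- keys represent no Python input, so they are excluded (nothing A returns on is excluded).
def Pre_merge_partial_kits (current_stock : List (String × Int)) (partial_kit_contents : List (String × Int)) : Prop :=
  (current_stock.map Prod.fst).Nodup ∧ (partial_kit_contents.map Prod.fst).Nodup
instance (current_stock : List (String × Int)) (partial_kit_contents : List (String × Int)) : Decidable (Pre_merge_partial_kits current_stock partial_kit_contents) := by unfold Pre_merge_partial_kits; infer_instance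

def pvWitness_merge_partial_kits : (List (String × Int)) × (List (String × Int)) :=
  ([("Partial Kits", 2), ("Resistor", 1)], [("Resistor", 3), ("LED", 1)])

def Spec_merge_partial_kits (current_stock : List (String × Int)) (partial_kit_contents : List (String × Int)) (out : List (String × Int)) : Prop := out = merge_partial_kits_alt current_stock partial_kit_contents
instance (current_stock : List (String × Int)) (partial_kit_contents : List (String × Int)) (out : List (String × Int)) : Decidable (Spec_merge_partial_kits current_stock partial_kit_contents out) := by unfold Spec_merge_partial_kits; infer_instance

-- ===== CLAIM (what is proved, stated in full; the proofs are below) =====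
def Claim_equal_merge_partial_kits : Prop := ∀ (current_stock : List (String × Int)) (partial_kit_contents : List (String × Int)), Dom_merge_partial_kits current_stock partial_kit_contents → Pre_merge_partial_kits current_stock partial_kit_contents → Spec_merge_partial_kits current_stock partial_kit_contents (merge_partial_kits current_stock partial_kit_contents)

-- ===== LEMMAS AND PROOFS =====

-- the closed form for the state of the Counter after n >= 1 additions of the kit contents:
-- surviving stock keys in place, then kit-only keys, then removed-and-re-appended keys
def pvPart0 (s p : PySem.Dict String Int) (n : Int) : List (String × Int) :=
  (s.items.filter
      (fun q => (decide (p.getD q.1 0 ≤ 0) || decide (0 < q.2 + p.getD q.1 0))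
                  && decide (0 < q.2 + n * p.getD q.1 0))).map
    (fun q => (q.1, q.2 + n * p.getD q.1 0))

def pvPart1 (s p : PySem.Dict String Int) (n : Int) : List (String × Int) :=
  (p.items.filter (fun q => decide (0 < q.2) && !s.contains q.1)).map
    (fun q => (q.1, n * q.2))

def pvPart2 (s p : PySem.Dict String Int) (n : Int) : List (String × Int) :=
  if 2 ≤ n then
    (p.items.filter
        (fun q => decide (0 < q.2) && s.contains q.1 && decide (s.getD q.1 0 + q.2 ≤ 0))).map
      (fun q => (q.1, (n - 1) * q.2))
  else []

def pvClosed (s p : PySem.Dict String Int) (n : Int) : List (String × Int) :=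
  pvPart0 s p n ++ pvPart1 s p n ++ pvPart2 s p n

-- arithmetic: a value positive after n+1 additions and not filtered out was positive after n
theorem pv_key (i v c : Int) (hi : 1 ≤ i) (h1 : c ≤ 0 ∨ 0 < v + c)
    (h2 : 0 < v + (i + 1) * c) : 0 < v + i * c := by
  have e : (i + 1) * c = i * c + c := by ring
  rw [e] at h2
  rcases h1 with h | h
  · omega
  · by_cases hc : c ≤ 0
    · omega
    · have hc' : (0 : Int) ≤ c := by omega
      have := le_mul_of_one_le_left hc' hi
      omega

theorem pv_c_le_mul (i c : Int) (hi : 1 ≤ i) (hc : 0 ≤ c) : c ≤ i * c :=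
  le_mul_of_one_le_left hc hi

theorem pv_mul_nonpos (m c : Int) (hm : 0 ≤ m) (hc : c ≤ 0) : m * c ≤ 0 := by
  have := mul_le_mul_of_nonneg_left hc hm
  simpa using this

-- membership in a dict with distinct keys, phrased through contains/getD
theorem pv_mem_items {d : PySem.Dict String Int} (h : d.keys.Nodup) (k : String) (v : Int) :
    (k, v) ∈ d.items ↔ (d.contains k = true ∧ d.getD k 0 = v) := by
  rw [← PySem.Dict.get?_eq_some_iff_mem_items d k v h, PySem.Dict.contains_eq_isSome_get?,
    PySem.Dict.getD_eq_get?_getD]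
  cases d.get? k <;> simp

theorem pv_getD_mem {p : PySem.Dict String Int} (hp : p.keys.Nodup) {q : String × Int}
    (hq : q ∈ p.items) : p.getD q.1 0 = q.2 :=
  PySem.Dict.getD_of_mem_items p (by simpa using hq) hp 0

theorem pv_contains_of_mem {p : PySem.Dict String Int} {q : String × Int}
    (hq : q ∈ p.items) : p.contains q.1 = true := by
  unfold PySem.Dict.contains
  exact List.any_eq_true.mpr ⟨q, hq, by simp⟩

-- looking a key up in a value-scaled dict scales the looked-up value
theorem pv_getD_scaled (l : List (String × Int)) (m : Int) (k : String) :
    (PySem.Dict.mk (l.map (fun q => (q.1, m * q.2)))).getD k 0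
      = m * (PySem.Dict.mk l).getD k 0 := by
  induction l with
  | nil =>
    simp [PySem.Dict.getD_eq_get?_getD, PySem.Dict.get?]
  | cons a t ih =>
    obtain ⟨k1, v1⟩ := a
    simp only [List.map_cons, PySem.Dict.getD_eq_get?_getD, PySem.Dict.get?_mk_cons]
    by_cases h : (k1 == k) = true
    · rw [if_pos h, if_pos h]
      rfl
    · rw [if_neg h, if_neg h]
      simpa [PySem.Dict.getD_eq_get?_getD] using ih

-- Counter.update over an association list with distinct keys: update in place, append the rest
theorem pv_updAdd (P : List (String × Int)) (st : PySem.Dict String Int)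
    (hst : st.keys.Nodup) (hP : (P.map Prod.fst).Nodup) :
    (P.foldl (fun d kc => d.insert kc.1 (d.getD kc.1 0 + kc.2)) st).items
      = st.items.map (fun q => (q.1, q.2 + (PySem.Dict.mk P).getD q.1 0))
          ++ P.filter (fun kc => !st.contains kc.1) := by
  induction P generalizing st with
  | nil =>
    simp [PySem.Dict.getD_eq_get?_getD, PySem.Dict.get?]
  | cons kc P ih =>
    obtain ⟨k, c⟩ := kc
    have hk : k ∉ P.map Prod.fst := by simpa using (List.nodup_cons.mp hP).1
    have hP' := (List.nodup_cons.mp hP).2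
    have hgP : (PySem.Dict.mk P).getD k 0 = 0 := by
      rw [PySem.Dict.getD_eq_get?_getD,
        (PySem.Dict.get?_eq_none_iff_not_mem_keys _ _).mpr (by simpa [PySem.Dict.keys_mk] using hk)]
      rfl
    simp only [List.foldl_cons]
    rw [ih (st.insert k (st.getD k 0 + c)) (PySem.Dict.nodup_keys_insert st k _ hst) hP']
    by_cases h : st.contains k = true
    · rw [PySem.Dict.items_insert_of_contains st _ h, List.map_map]
      have hmap : st.items.map
            ((fun q => (q.1, q.2 + (PySem.Dict.mk P).getD q.1 0)) ∘
              (fun p => if (p.1 == k) = true then (k, st.getD k 0 + c) else p))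
          = st.items.map (fun q => (q.1, q.2 + (PySem.Dict.mk ((k, c) :: P)).getD q.1 0)) := by
        apply List.map_congr_left
        intro q hq
        obtain ⟨qk, qv⟩ := q
        by_cases e : qk = k
        · subst e
          have hv' : (st.get? qk).getD 0 = qv := by
            rw [← PySem.Dict.getD_eq_get?_getD]
            exact PySem.Dict.getD_of_mem_items st hq hst 0
          have hgP' : (({ items := P } : PySem.Dict String Int).get? qk).getD 0 = 0 := by
            rw [← PySem.Dict.getD_eq_get?_getD]
            exact hgP
          simp [PySem.Dict.getD_eq_get?_getD, PySem.Dict.get?_mk_cons, hv', hgP']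
        · have hne' : (k == qk) = false := by simp [Ne.symm e]
          simp [Function.comp_apply, e, PySem.Dict.getD_eq_get?_getD,
            PySem.Dict.get?_mk_cons, hne']
      rw [hmap]
      have hfil : P.filter (fun kc => !(st.insert k (st.getD k 0 + c)).contains kc.1)
          = P.filter (fun kc => !st.contains kc.1) := by
        apply List.filter_congr
        intro x hx
        have hxk : x.1 ≠ k := fun e => hk (e ▸ List.mem_map_of_mem hx)
        rw [PySem.Dict.contains_insert]
        simp [hxk]
      rw [hfil]
      have : List.filter (fun kc => !st.contains kc.1) ((k, c) :: P)
          = P.filter (fun kc => !st.contains kc.1) := by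
        rw [List.filter_cons]
        simp [h]
      rw [this]
    · have h' : st.contains k = false := by simpa using h
      rw [PySem.Dict.items_insert_of_not_contains st _ h',
        PySem.Dict.getD_of_not_contains st _ h', List.map_append]
      have hone : List.map (fun q => (q.1, q.2 + (PySem.Dict.mk P).getD q.1 0)) [(k, 0 + c)]
          = [(k, c)] := by
        simp [hgP]
      rw [hone]
      have hmap : st.items.map (fun q => (q.1, q.2 + (PySem.Dict.mk P).getD q.1 0))
          = st.items.map (fun q => (q.1, q.2 + (PySem.Dict.mk ((k, c) :: P)).getD q.1 0)) := by
        apply List.map_congr_left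
        intro q hq
        have hqk : q.1 ≠ k := by
          intro e
          have hcq : st.contains q.1 = true := pv_contains_of_mem hq
          rw [e, h'] at hcq
          exact Bool.noConfusion hcq
        have hne' : (k == q.1) = false := by simp [Ne.symm hqk]
        simp [PySem.Dict.getD_eq_get?_getD, PySem.Dict.get?_mk_cons, hne']
      rw [hmap]
      have hfil : P.filter (fun kc => !(st.insert k (0 + c)).contains kc.1)
          = P.filter (fun kc => !st.contains kc.1) := by
        apply List.filter_congr
        intro x hx
        have hxk : x.1 ≠ k := fun e => hk (e ▸ List.mem_map_of_mem hx)
        rw [PySem.Dict.contains_insert]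
        simp [hxk]
      rw [hfil]
      have hcons : List.filter (fun kc => !st.contains kc.1) ((k, c) :: P)
          = (k, c) :: P.filter (fun kc => !st.contains kc.1) := by
        rw [List.filter_cons]
        simp [h']
      rw [hcons]
      simp [List.append_assoc]

-- the first components survive filter+map untouched
theorem pv_nodup_fm (l : List (String × Int)) (b : String × Int → Bool)
    (g : String × Int → String × Int) (hg : ∀ q, (g q).1 = q.1)
    (h : (l.map Prod.fst).Nodup) : (((l.filter b).map g).map Prod.fst).Nodup := by
  rw [List.map_map]
  have hfg : (Prod.fst ∘ g) = (Prod.fst : String × Int → String) := funext hg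
  rw [hfg]
  exact h.sublist (List.filter_sublist.map Prod.fst)

theorem pv_mem_fm {l : List (String × Int)} {b : String × Int → Bool}
    (f : String × Int → Int) {a : String} :
    a ∈ ((l.filter b).map (fun q => (q.1, f q))).map Prod.fst
      ↔ ∃ q ∈ l, b q = true ∧ q.1 = a := by
  simp only [List.mem_map, List.mem_filter]
  constructor
  · rintro ⟨y, ⟨q, ⟨hq, hb⟩, rfl⟩, rfl⟩
    exact ⟨q, hq, hb, rfl⟩
  · rintro ⟨q, hq, hb, rfl⟩
    exact ⟨(q.1, f q), ⟨q, ⟨hq, hb⟩, rfl⟩, rfl⟩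

-- keys of the in-place part and of the appended kit-only part never meet
theorem pv_disj01 (s p : PySem.Dict String Int) (n : Int) :
    ∀ a ∈ ((s.items.filter (fun q =>
          (decide (p.getD q.1 0 ≤ 0) || decide (0 < q.2 + p.getD q.1 0))
          && decide (0 < q.2 + n * p.getD q.1 0))).map
            (fun q => (q.1, q.2 + n * p.getD q.1 0))).map Prod.fst,
      ∀ b ∈ ((p.items.filter (fun q => decide (0 < q.2) && !s.contains q.1)).map
            (fun q => (q.1, n * q.2))).map Prod.fst, a ≠ b := by
  intro a ha b hb heq
  subst heq
  rw [pv_mem_fm] at ha hb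
  obtain ⟨q, hq, _, hqa⟩ := ha
  obtain ⟨r, hr, hbr, hra⟩ := hb
  have h1 : s.contains q.1 = true := pv_contains_of_mem hq
  have h2 : s.contains r.1 = false := by
    have := (Bool.and_eq_true _ _).mp hbr
    simpa using this.2
  rw [hqa] at h1
  rw [hra] at h2
  exact Bool.noConfusion (h1.symm.trans h2)

-- keys of the first two parts and of the re-appended part never meet
theorem pv_disj2 (s p : PySem.Dict String Int) (n : Int)
    (hs : s.keys.Nodup) (hp : p.keys.Nodup) :
    ∀ a ∈ ((((s.items.filter (fun q =>
          (decide (p.getD q.1 0 ≤ 0) || decide (0 < q.2 + p.getD q.1 0))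
          && decide (0 < q.2 + n * p.getD q.1 0))).map
            (fun q => (q.1, q.2 + n * p.getD q.1 0))).map Prod.fst)
        ++ (((p.items.filter (fun q => decide (0 < q.2) && !s.contains q.1)).map
            (fun q => (q.1, n * q.2))).map Prod.fst)),
      ∀ b ∈ ((p.items.filter
          (fun q => decide (0 < q.2) && s.contains q.1 && decide (s.getD q.1 0 + q.2 ≤ 0))).map
            (fun q => (q.1, (n - 1) * q.2))).map Prod.fst, a ≠ b := by
  intro a ha b hb heq
  subst heq
  rw [List.mem_append] at ha
  rw [pv_mem_fm] at hb
  obtain ⟨r, hr, hbr, hra⟩ := hb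
  simp only [Bool.and_eq_true, decide_eq_true_eq] at hbr
  obtain ⟨⟨hc, hcon⟩, hle⟩ := hbr
  rcases ha with ha | ha
  · rw [pv_mem_fm] at ha
    obtain ⟨q, hq, hbq, hqa⟩ := ha
    simp only [Bool.and_eq_true, Bool.or_eq_true, decide_eq_true_eq] at hbq
    have hqk : q.1 = r.1 := by rw [hqa, hra]
    have hv : s.getD r.1 0 = q.2 := by rw [← hqk]; exact pv_getD_mem hs hq
    have hc' : p.getD r.1 0 = r.2 := pv_getD_mem hp hr
    rw [hqk, hc'] at hbq
    rw [hv] at hle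
    rcases hbq.1 with h | h <;> omega
  · rw [pv_mem_fm] at ha
    obtain ⟨q, hq, hbq, hqa⟩ := ha
    simp only [Bool.and_eq_true, decide_eq_true_eq] at hbq
    have h2 : s.contains q.1 = false := by simpa using hbq.2
    rw [hqa] at h2
    rw [hra] at hcon
    exact Bool.noConfusion (hcon.symm.trans h2)

-- the keys of the closed form are distinct
theorem pv_nodup_closed (s p : PySem.Dict String Int) (n : Int)
    (hs : s.keys.Nodup) (hp : p.keys.Nodup) :
    ((pvClosed s p n).map Prod.fst).Nodup := by
  unfold pvClosed pvPart0 pvPart1 pvPart2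
  by_cases hn : 2 ≤ n
  · rw [if_pos hn, List.map_append, List.map_append]
    refine List.nodup_append.mpr ⟨List.nodup_append.mpr ⟨?_, ?_, ?_⟩, ?_, ?_⟩
    · exact pv_nodup_fm _ _ _ (fun q => rfl) hs
    · exact pv_nodup_fm _ _ _ (fun q => rfl) hp
    · exact pv_disj01 s p n
    · exact pv_nodup_fm _ _ _ (fun q => rfl) hp
    · exact pv_disj2 s p n hs hp
  · rw [if_neg hn, List.map_append, List.map_append, List.map_nil, List.append_nil]
    refine List.nodup_append.mpr ⟨?_, ?_, ?_⟩
    · exact pv_nodup_fm _ _ _ (fun q => rfl) hs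
    · exact pv_nodup_fm _ _ _ (fun q => rfl) hp
    · exact pv_disj01 s p n

-- a kit key with positive count is always present in the closed form at n >= 2
theorem pv_contains_closed_of {s p : PySem.Dict String Int} (hs : s.keys.Nodup)
    (hp : p.keys.Nodup) {q : String × Int} {n : Int} (hq : q ∈ p.items) (hc : 0 < q.2)
    (hn : 2 ≤ n) : (PySem.Dict.mk (pvClosed s p n)).contains q.1 = true := by
  obtain ⟨k, c⟩ := q
  simp only at hc ⊢
  have hcp : p.getD k 0 = c := pv_getD_mem hp hq
  rw [PySem.Dict.contains_mk]
  apply List.any_eq_true.mpr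
  unfold pvClosed pvPart0 pvPart1 pvPart2
  by_cases hcs : s.contains k = true
  · obtain ⟨v, hv⟩ : ∃ v, s.getD k 0 = v := ⟨_, rfl⟩
    have hmem : (k, v) ∈ s.items := (pv_mem_items hs k v).mpr ⟨hcs, hv⟩
    by_cases hvc : 0 < v + c
    · -- in part0
      have hcond : ((decide (p.getD (k, v).1 0 ≤ 0)
            || decide (0 < (k, v).2 + p.getD (k, v).1 0))
          && decide (0 < (k, v).2 + n * p.getD (k, v).1 0)) = true := by
        have h1 : c ≤ n * c := pv_c_le_mul n c (by omega) hc.le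
        simp only [hcp]
        simp only [Bool.and_eq_true, Bool.or_eq_true, decide_eq_true_eq]
        exact ⟨Or.inr hvc, by omega⟩
      have h0 : ((k, v) : String × Int) ∈ s.items.filter (fun q =>
          (decide (p.getD q.1 0 ≤ 0) || decide (0 < q.2 + p.getD q.1 0))
          && decide (0 < q.2 + n * p.getD q.1 0)) := List.mem_filter.mpr ⟨hmem, hcond⟩
      have h1 := List.mem_map_of_mem (f := fun q : String × Int =>
        (q.1, q.2 + n * p.getD q.1 0)) h0
      exact ⟨_, List.mem_append_left _ (List.mem_append_left _ h1), by simp⟩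
    · -- in part2
      rw [if_pos hn]
      have hcond : (decide (0 < (k, c).2) && s.contains (k, c).1
          && decide (s.getD (k, c).1 0 + (k, c).2 ≤ 0)) = true := by
        simp only [hv]
        simp only [Bool.and_eq_true, decide_eq_true_eq]
        exact ⟨⟨by simpa using hc, hcs⟩, by omega⟩
      have h0 : ((k, c) : String × Int) ∈ p.items.filter (fun q =>
          decide (0 < q.2) && s.contains q.1
          && decide (s.getD q.1 0 + q.2 ≤ 0)) := List.mem_filter.mpr ⟨hq, hcond⟩
      have h1 := List.mem_map_of_mem (f := fun q : String × Int => (q.1, (n - 1) * q.2)) h0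
      exact ⟨_, List.mem_append_right _ h1, by simp⟩
  · -- in part1
    have hcs' : s.contains k = false := by simpa using hcs
    have hcond : (decide (0 < (k, c).2) && !s.contains (k, c).1) = true := by
      simp [hc, hcs']
    have h0 : ((k, c) : String × Int) ∈ p.items.filter (fun q =>
        decide (0 < q.2) && !s.contains q.1) := List.mem_filter.mpr ⟨hq, hcond⟩
    have h1 := List.mem_map_of_mem (f := fun q : String × Int => (q.1, n * q.2)) h0
    exact ⟨_, List.mem_append_left _ (List.mem_append_right _ h1), by simp⟩

-- which kit keys are missing from the closed form after ONE addition
theorem pv_append_cond_one {s p : PySem.Dict String Int} (hs : s.keys.Nodup)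
    (hp : p.keys.Nodup) {q : String × Int} (hq : q ∈ p.items) :
    (decide (0 < q.2) && !(PySem.Dict.mk (pvClosed s p 1)).contains q.1)
      = (decide (0 < q.2) && s.contains q.1 && decide (s.getD q.1 0 + q.2 ≤ 0)) := by
  obtain ⟨k, c⟩ := q
  simp only
  have hcp : p.getD k 0 = c := pv_getD_mem hp hq
  by_cases hc : 0 < c
  · simp only [hc, decide_true, Bool.true_and]
    by_cases hcs : s.contains k = true
    · obtain ⟨v, hv⟩ : ∃ v, s.getD k 0 = v := ⟨_, rfl⟩
      have hmem : (k, v) ∈ s.items := (pv_mem_items hs k v).mpr ⟨hcs, hv⟩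
      by_cases hvc : 0 < v + c
      · -- present in part0, both sides false
        have hin : (PySem.Dict.mk (pvClosed s p 1)).contains k = true := by
          rw [PySem.Dict.contains_mk]
          apply List.any_eq_true.mpr
          unfold pvClosed pvPart0 pvPart1 pvPart2
          have hcond : ((decide (p.getD (k, v).1 0 ≤ 0)
                || decide (0 < (k, v).2 + p.getD (k, v).1 0))
              && decide (0 < (k, v).2 + 1 * p.getD (k, v).1 0)) = true := by
            simp only [hcp]
            simp only [Bool.and_eq_true, Bool.or_eq_true, decide_eq_true_eq]
            exact ⟨Or.inr hvc, by omega⟩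
          have h0 : ((k, v) : String × Int) ∈ s.items.filter (fun q =>
              (decide (p.getD q.1 0 ≤ 0) || decide (0 < q.2 + p.getD q.1 0))
              && decide (0 < q.2 + 1 * p.getD q.1 0)) :=
            List.mem_filter.mpr ⟨hmem, hcond⟩
          have h1 := List.mem_map_of_mem (f := fun q : String × Int =>
            (q.1, q.2 + 1 * p.getD q.1 0)) h0
          exact ⟨_, List.mem_append_left _ (List.mem_append_left _ h1), by simp⟩
        rw [hin, hcs, hv]
        simp [show ¬(v + c ≤ 0) from by omega]
      · -- absent, both sides true
        have hout : (PySem.Dict.mk (pvClosed s p 1)).contains k = false := by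
          rw [PySem.Dict.contains_mk]
          apply List.any_eq_false.mpr
          intro x hx
          unfold pvClosed pvPart0 pvPart1 pvPart2 at hx
          rw [if_neg (by omega : ¬ (2 : Int) ≤ 1), List.append_nil] at hx
          rcases List.mem_append.mp hx with hx | hx
          · simp only [List.mem_map, List.mem_filter] at hx
            obtain ⟨r, ⟨hr, hbr⟩, rfl⟩ := hx
            simp only [Bool.and_eq_true, Bool.or_eq_true, decide_eq_true_eq] at hbr
            simp only [beq_iff_eq]
            intro e
            have hr' : (k, r.2) ∈ s.items := by rw [← e]; simpa using hr
            have hv2 : s.getD k 0 = r.2 := PySem.Dict.getD_of_mem_items s hr' hs 0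
            rw [e, hcp] at hbr
            rw [hv] at hv2
            rcases hbr.1 with hh | hh <;> omega
          · simp only [List.mem_map, List.mem_filter] at hx
            obtain ⟨r, ⟨hr, hbr⟩, rfl⟩ := hx
            simp only [Bool.and_eq_true, decide_eq_true_eq] at hbr
            simp only [beq_iff_eq]
            intro e
            have h2 : s.contains r.1 = false := by simpa using hbr.2
            rw [e, hcs] at h2
            exact Bool.noConfusion h2
        rw [hout, hcs, hv]
        simp [show v + c ≤ 0 from by omega]
    · -- s does not contain k: present in part1, both sides false
      have hcs' : s.contains k = false := by simpa using hcs
      have hin : (PySem.Dict.mk (pvClosed s p 1)).contains k = true := by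
        rw [PySem.Dict.contains_mk]
        apply List.any_eq_true.mpr
        unfold pvClosed pvPart0 pvPart1 pvPart2
        have hcond : (decide (0 < (k, c).2) && !s.contains (k, c).1) = true := by
          simp [hc, hcs']
        have h0 : ((k, c) : String × Int) ∈ p.items.filter (fun q =>
            decide (0 < q.2) && !s.contains q.1) := List.mem_filter.mpr ⟨hq, hcond⟩
        have h1 := List.mem_map_of_mem (f := fun q : String × Int => (q.1, 1 * q.2)) h0
        exact ⟨_, List.mem_append_left _ (List.mem_append_right _ h1), by simp⟩
      rw [hin, hcs']
      simp
  · have hc' : decide (0 < c) = false := by simp [hc]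
    rw [hc']
    simp

-- the first Counter addition produces the closed form at 1
theorem pv_base (s : PySem.Dict String Int) (pkc : List (String × Int))
    (hs : s.keys.Nodup) (hp : (pkc.map Prod.fst).Nodup) :
    pvCounterAdd s pkc = PySem.Dict.mk (pvClosed s (PySem.Dict.mk pkc) 1) := by
  unfold pvCounterAdd
  apply PySem.Dict.ext
  show (_ : List (String × Int)).filter _ = _
  rw [pv_updAdd pkc s hs hp, List.filter_append]
  unfold pvClosed pvPart0 pvPart1 pvPart2
  rw [if_neg (by omega : ¬ (2 : Int) ≤ 1), List.append_nil]
  refine congrArg₂ (· ++ ·) ?_ ?_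
  · -- the in-place part
    have hfun : (fun q : String × Int => (q.1, q.2 + (PySem.Dict.mk pkc).getD q.1 0))
        = (fun q : String × Int => (q.1, q.2 + 1 * (PySem.Dict.mk pkc).getD q.1 0)) := by
      funext q
      simp
    rw [hfun, List.filter_map]
    refine congrArg (List.map _) ?_
    apply List.filter_congr
    intro q _
    simp only [Function.comp_apply]
    by_cases h : 0 < q.2 + (PySem.Dict.mk pkc).getD q.1 0 <;> simp [h]
  · -- the appended part
    rw [List.filter_filter]
    have hfun : (fun q : String × Int => (q.1, 1 * q.2)) = id := by
      funext q
      simp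
    rw [hfun, List.map_id]

-- adding the kit contents scaled by m >= 1 to the closed form at 1 gives the closed form at m+1
theorem pv_step_scaled (s : PySem.Dict String Int) (pkc : List (String × Int)) (m : Int)
    (hm : 1 ≤ m) (hs : s.keys.Nodup) (hp : (pkc.map Prod.fst).Nodup) :
    pvCounterAdd (PySem.Dict.mk (pvClosed s (PySem.Dict.mk pkc) 1))
        (pkc.map (fun q => (q.1, m * q.2)))
      = PySem.Dict.mk (pvClosed s (PySem.Dict.mk pkc) (m + 1)) := by
  have hpk : (PySem.Dict.mk pkc).keys.Nodup := by simpa [PySem.Dict.keys_mk] using hp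
  have hnd : (PySem.Dict.mk (pvClosed s (PySem.Dict.mk pkc) 1)).keys.Nodup := by
    rw [PySem.Dict.keys_mk]
    exact pv_nodup_closed s (PySem.Dict.mk pkc) 1 hs hpk
  have hPs : ((pkc.map (fun q : String × Int => (q.1, m * q.2))).map Prod.fst).Nodup := by
    rw [List.map_map]
    have : (Prod.fst ∘ fun q : String × Int => (q.1, m * q.2))
        = (Prod.fst : String × Int → String) := funext (fun q => rfl)
    rw [this]
    exact hp
  unfold pvCounterAdd
  apply PySem.Dict.ext
  show (_ : List (String × Int)).filter _ = _
  rw [pv_updAdd _ _ hnd hPs, List.filter_append]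
  have hitems : (PySem.Dict.mk (pvClosed s (PySem.Dict.mk pkc) 1)).items
      = pvClosed s (PySem.Dict.mk pkc) 1 := rfl
  rw [hitems]
  set p := PySem.Dict.mk pkc with hpdef
  have hgd : ∀ k : String,
      (PySem.Dict.mk (pkc.map (fun q : String × Int => (q.1, m * q.2)))).getD k 0
        = m * p.getD k 0 := fun k => pv_getD_scaled pkc m k
  -- the entries already present
  have hmapped : ((pvClosed s p 1).map
        (fun q => (q.1, q.2 + (PySem.Dict.mk (pkc.map (fun q : String × Int =>
          (q.1, m * q.2)))).getD q.1 0))).filter (fun q => decide (0 < q.2))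
      = pvPart0 s p (m + 1) ++ pvPart1 s p (m + 1) := by
    have hfun : (fun q : String × Int => (q.1, q.2 + (PySem.Dict.mk (pkc.map
          (fun q : String × Int => (q.1, m * q.2)))).getD q.1 0))
        = (fun q : String × Int => (q.1, q.2 + m * p.getD q.1 0)) := by
      funext q
      rw [hgd q.1]
    rw [hfun]
    unfold pvClosed pvPart2
    rw [if_neg (by omega : ¬ (2 : Int) ≤ 1), List.append_nil, List.map_append,
      List.filter_append]
    refine congrArg₂ (· ++ ·) ?_ ?_
    · -- part0
      unfold pvPart0
      rw [List.map_map]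
      have hfun2 : ((fun q : String × Int => (q.1, q.2 + m * p.getD q.1 0)) ∘
            (fun q : String × Int => (q.1, q.2 + 1 * p.getD q.1 0)))
          = (fun q : String × Int => (q.1, q.2 + (m + 1) * p.getD q.1 0)) := by
        funext q
        simp only [Function.comp_apply, Prod.mk.injEq]
        exact ⟨trivial, by ring⟩
      rw [hfun2, List.filter_map, List.filter_filter]
      refine congrArg (List.map _) ?_
      apply List.filter_congr
      intro q _
      simp only [Function.comp_apply]
      by_cases hd : p.getD q.1 0 ≤ 0 ∨ 0 < q.2 + p.getD q.1 0
      · have hd' : (decide (p.getD q.1 0 ≤ 0) || decide (0 < q.2 + p.getD q.1 0)) = true := by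
          rcases hd with h | h <;> simp [h]
        by_cases h2 : 0 < q.2 + (m + 1) * p.getD q.1 0
        · have h1 : 0 < q.2 + p.getD q.1 0 := by
            rcases hd with h | h
            · have hmc : m * p.getD q.1 0 ≤ 0 := pv_mul_nonpos m _ (by omega) h
              have he : (m + 1) * p.getD q.1 0 = m * p.getD q.1 0 + p.getD q.1 0 := by ring
              rw [he] at h2
              omega
            · exact h
          simp [h1, h2]
        · simp [h2]
      · obtain ⟨hna, hnb⟩ := not_or.mp hd
        simp [hna, hnb]
    · -- part1
      unfold pvPart1
      rw [List.map_map, List.filter_map]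
      have hself : (p.items.filter (fun q => decide (0 < q.2) && !s.contains q.1)).filter
            ((fun q : String × Int => decide (0 < q.2)) ∘
              ((fun q : String × Int => (q.1, q.2 + m * p.getD q.1 0)) ∘
                (fun q : String × Int => (q.1, 1 * q.2))))
          = p.items.filter (fun q => decide (0 < q.2) && !s.contains q.1) := by
        apply List.filter_eq_self.mpr
        intro x hx
        have hx' : x ∈ p.items := (List.mem_filter.mp hx).1
        have hxpos : 0 < x.2 := by
          have := (List.mem_filter.mp hx).2
          simp only [Bool.and_eq_true, decide_eq_true_eq] at this
          exact this.1
        have hgdx : p.getD x.1 0 = x.2 := pv_getD_mem hpk hx'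
        simp only [Function.comp_apply, decide_eq_true_eq, hgdx]
        have := pv_c_le_mul m x.2 hm hxpos.le
        omega
      rw [hself]
      apply List.map_congr_left
      intro q hq
      have hq' : q ∈ p.items := (List.mem_filter.mp hq).1
      simp only [Function.comp_apply, pv_getD_mem hpk hq', Prod.mk.injEq]
      exact ⟨trivial, by ring⟩
  rw [hmapped]
  -- the appended entries: exactly the re-appended part of the closed form
  have happ : ((pkc.map (fun q : String × Int => (q.1, m * q.2))).filter
        (fun kc => !(PySem.Dict.mk (pvClosed s p 1)).contains kc.1)).filter
        (fun q => decide (0 < q.2))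
      = pvPart2 s p (m + 1) := by
    rw [List.filter_map, List.filter_map, List.filter_filter]
    unfold pvPart2
    rw [if_pos (by omega : (2 : Int) ≤ m + 1)]
    have hmapeq : (fun q : String × Int => (q.1, (m + 1 - 1) * q.2))
        = (fun q : String × Int => (q.1, m * q.2)) := by
      funext q
      rw [show (m + 1 - 1 : Int) = m by ring]
    rw [hmapeq]
    refine congrArg (List.map _) ?_
    apply List.filter_congr
    intro q hq
    have hq' : q ∈ p.items := hq
    have hcond : (decide (0 < q.2) && !(PySem.Dict.mk (pvClosed s p 1)).contains q.1)
        = (decide (0 < q.2) && s.contains q.1 && decide (s.getD q.1 0 + q.2 ≤ 0)) :=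
      pv_append_cond_one hs hpk hq'
    have hpos : decide (0 < m * q.2) = decide (0 < q.2) := by
      by_cases h : 0 < q.2
      · have := mul_pos (by omega : (0 : Int) < m) h
        simp [h, this]
      · have hle : q.2 ≤ 0 := by omega
        have := pv_mul_nonpos m q.2 (by omega) hle
        simp [h, show ¬ 0 < m * q.2 by omega]
    show (decide (0 < m * q.2) && !(PySem.Dict.mk (pvClosed s p 1)).contains q.1) = _
    rw [hpos, hcond]
  rw [happ]
  show pvPart0 s p (m + 1) ++ pvPart1 s p (m + 1) ++ pvPart2 s p (m + 1) = _
  rfl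

-- one more Counter addition maps the closed form at i >= 1 to the closed form at i + 1
theorem pv_step (s : PySem.Dict String Int) (pkc : List (String × Int)) (i : Int)
    (hi : 1 ≤ i) (hs : s.keys.Nodup) (hp : (pkc.map Prod.fst).Nodup) :
    pvCounterAdd (PySem.Dict.mk (pvClosed s (PySem.Dict.mk pkc) i)) pkc
      = PySem.Dict.mk (pvClosed s (PySem.Dict.mk pkc) (i + 1)) := by
  have hpk : (PySem.Dict.mk pkc).keys.Nodup := by simpa [PySem.Dict.keys_mk] using hp
  have hnd : (PySem.Dict.mk (pvClosed s (PySem.Dict.mk pkc) i)).keys.Nodup := by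
    rw [PySem.Dict.keys_mk]
    exact pv_nodup_closed s (PySem.Dict.mk pkc) i hs hpk
  unfold pvCounterAdd
  apply PySem.Dict.ext
  show (_ : List (String × Int)).filter _ = _
  rw [pv_updAdd pkc _ hnd hp, List.filter_append]
  have hitems : (PySem.Dict.mk (pvClosed s (PySem.Dict.mk pkc) i)).items
      = pvClosed s (PySem.Dict.mk pkc) i := rfl
  rw [hitems]
  set p := PySem.Dict.mk pkc with hpdef
  -- the entries already present: each part advances one step
  have hmapped : ((pvClosed s p i).map (fun q => (q.1, q.2 + p.getD q.1 0))).filter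
        (fun q => decide (0 < q.2))
      = pvPart0 s p (i + 1) ++ pvPart1 s p (i + 1)
          ++ (if 2 ≤ i then pvPart2 s p (i + 1) else []) := by
    unfold pvClosed
    rw [List.map_append, List.map_append, List.filter_append, List.filter_append]
    refine congrArg₂ (· ++ ·) (congrArg₂ (· ++ ·) ?_ ?_) ?_
    · -- part0
      unfold pvPart0
      rw [List.map_map]
      have hfun : ((fun q : String × Int => (q.1, q.2 + p.getD q.1 0)) ∘
            (fun q : String × Int => (q.1, q.2 + i * p.getD q.1 0)))
          = (fun q : String × Int => (q.1, q.2 + (i + 1) * p.getD q.1 0)) := by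
        funext q
        simp only [Function.comp_apply, Prod.mk.injEq]
        exact ⟨trivial, by ring⟩
      rw [hfun, List.filter_map, List.filter_filter]
      refine congrArg (List.map _) ?_
      apply List.filter_congr
      intro q _
      simp only [Function.comp_apply]
      by_cases hd : p.getD q.1 0 ≤ 0 ∨ 0 < q.2 + p.getD q.1 0
      · have hd' : (decide (p.getD q.1 0 ≤ 0) || decide (0 < q.2 + p.getD q.1 0)) = true := by
          rcases hd with h | h <;> simp [h]
        by_cases h2 : 0 < q.2 + (i + 1) * p.getD q.1 0
        · have h1 : 0 < q.2 + i * p.getD q.1 0 := pv_key i q.2 _ hi hd h2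
          simp [hd', h1, h2]
        · simp [h2]
      · obtain ⟨hna, hnb⟩ := not_or.mp hd
        simp [hna, hnb]
    · -- part1
      unfold pvPart1
      rw [List.map_map, List.filter_map]
      have hself : (p.items.filter (fun q => decide (0 < q.2) && !s.contains q.1)).filter
            ((fun q : String × Int => decide (0 < q.2)) ∘
              ((fun q : String × Int => (q.1, q.2 + p.getD q.1 0)) ∘
                (fun q : String × Int => (q.1, i * q.2))))
          = p.items.filter (fun q => decide (0 < q.2) && !s.contains q.1) := by
        apply List.filter_eq_self.mpr
        intro x hx
        have hx' : x ∈ p.items := (List.mem_filter.mp hx).1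
        have hxpos : 0 < x.2 := by
          have := (List.mem_filter.mp hx).2
          simp only [Bool.and_eq_true, decide_eq_true_eq] at this
          exact this.1
        have hgd : p.getD x.1 0 = x.2 := pv_getD_mem hpk hx'
        simp only [Function.comp_apply, decide_eq_true_eq, hgd]
        have := pv_c_le_mul i x.2 hi hxpos.le
        omega
      rw [hself]
      apply List.map_congr_left
      intro q hq
      have hq' : q ∈ p.items := (List.mem_filter.mp hq).1
      simp only [Function.comp_apply, pv_getD_mem hpk hq', Prod.mk.injEq]
      exact ⟨trivial, by ring⟩
    · -- part2
      unfold pvPart2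
      by_cases h2 : 2 ≤ i
      · rw [if_pos h2, if_pos h2, if_pos (by omega : (2 : Int) ≤ i + 1)]
        rw [List.map_map, List.filter_map]
        have hself : (p.items.filter (fun q =>
              decide (0 < q.2) && s.contains q.1 && decide (s.getD q.1 0 + q.2 ≤ 0))).filter
              ((fun q : String × Int => decide (0 < q.2)) ∘
                ((fun q : String × Int => (q.1, q.2 + p.getD q.1 0)) ∘
                  (fun q : String × Int => (q.1, (i - 1) * q.2))))
            = p.items.filter (fun q =>
                decide (0 < q.2) && s.contains q.1 && decide (s.getD q.1 0 + q.2 ≤ 0)) := by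
          apply List.filter_eq_self.mpr
          intro x hx
          have hx' : x ∈ p.items := (List.mem_filter.mp hx).1
          have hxpos : 0 < x.2 := by
            have := (List.mem_filter.mp hx).2
            simp only [Bool.and_eq_true, decide_eq_true_eq] at this
            exact this.1.1
          have hgd : p.getD x.1 0 = x.2 := pv_getD_mem hpk hx'
          simp only [Function.comp_apply, decide_eq_true_eq, hgd]
          have := pv_c_le_mul (i - 1) x.2 (by omega) hxpos.le
          omega
        rw [hself]
        apply List.map_congr_left
        intro q hq
        have hq' : q ∈ p.items := (List.mem_filter.mp hq).1
        simp only [Function.comp_apply, pv_getD_mem hpk hq', Prod.mk.injEq]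
        exact ⟨trivial, by ring⟩
      · rw [if_neg h2, if_neg h2]
        simp
  rw [hmapped]
  by_cases h2 : 2 ≤ i
  · -- every kit key with positive count is already present: nothing new is appended
    have happ : (pkc.filter
          (fun kc => !(PySem.Dict.mk (pvClosed s p i)).contains kc.1)).filter
          (fun q => decide (0 < q.2)) = [] := by
      apply List.filter_eq_nil_iff.mpr
      intro q hq
      have hqm : q ∈ pkc := (List.mem_filter.mp hq).1
      have hnc : (PySem.Dict.mk (pvClosed s p i)).contains q.1 = false := by
        simpa using (List.mem_filter.mp hq).2
      simp only [decide_eq_true_eq]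
      intro hpos
      have hin := pv_contains_closed_of hs hpk (show q ∈ p.items from hqm) hpos h2
      exact Bool.noConfusion (hin.symm.trans hnc)
    rw [if_pos h2, happ, List.append_nil]
    rfl
  · -- i = 1: the keys re-appended by the second addition
    have h1 : i = 1 := by omega
    subst h1
    rw [if_neg h2, List.append_nil]
    have happ : (pkc.filter
          (fun kc => !(PySem.Dict.mk (pvClosed s p 1)).contains kc.1)).filter
          (fun q => decide (0 < q.2)) = pvPart2 s p (1 + 1) := by
      rw [List.filter_filter]
      unfold pvPart2
      rw [if_pos (by omega : (2 : Int) ≤ 1 + 1)]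
      have hfun : (fun q : String × Int => (q.1, ((1 : Int) + 1 - 1) * q.2)) = id := by
        funext q
        simp
      rw [hfun, List.map_id]
      apply List.filter_congr
      intro q hq
      have heq := pv_append_cond_one hs hpk (show q ∈ p.items from hq)
      exact heq
    rw [happ]
    rfl

-- iterating: a foldl that ignores its elements is Function.iterate
theorem pv_foldl_const {α β : Type} (l : List β) (g : α → α) (s : α) :
    l.foldl (fun st _ => g st) s = g^[l.length] s := by
  induction l generalizing s with
  | nil => rfl
  | cons a t ih => simp [List.foldl_cons, ih, Function.iterate_succ_apply]

-- n + 1 Counter additions produce the closed form at n + 1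
theorem pv_iter (s : PySem.Dict String Int) (pkc : List (String × Int)) (n : Nat)
    (hs : s.keys.Nodup) (hp : (pkc.map Prod.fst).Nodup) :
    (fun st => pvCounterAdd st pkc)^[n + 1] s
      = PySem.Dict.mk (pvClosed s (PySem.Dict.mk pkc) ((n : Int) + 1)) := by
  induction n with
  | zero =>
    simpa using pv_base s pkc hs hp
  | succ m ih =>
    rw [Function.iterate_succ_apply', ih]
    rw [pv_step s pkc ((m : Int) + 1) (by omega) hs hp]
    have hcast : ((m : Int) + 1) + 1 = ((m + 1 : Nat) : Int) + 1 := by push_cast; ring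
    rw [hcast]

-- the empty range and the range length
theorem pv_pyRange_nil (c : Int) (hc : c ≤ 0) : PySem.List.pyRange 0 c 1 = [] := by
  simp only [PySem.List.pyRange]
  rw [if_neg (by omega : ¬ (1 : Int) = 0)]
  simp [show ¬ (0 : Int) < c by omega]

theorem pv_pyRange_len (c : Int) (hc : 0 < c) : (PySem.List.pyRange 0 c 1).length = c.toNat := by
  simp [PySem.List.pyRange, hc]

-- ===== VERDICT (by name: the statement is the Claim_ definition above) =====
theorem merge_partial_kits_spec : Claim_equal_merge_partial_kits := by
  intro cs pkc _ hpre
  unfold Spec_merge_partial_kits merge_partial_kits merge_partial_kits_alt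
  cases h : (PySem.Dict.mk cs).pop? "Partial Kits" with
  | none => rfl
  | some pr =>
    obtain ⟨count, popped⟩ := pr
    have hsk : popped.keys.Nodup := by
      have hpop : popped = (PySem.Dict.mk cs).erase "Partial Kits" := by
        unfold PySem.Dict.pop? at h
        cases hg : (PySem.Dict.mk cs).get? "Partial Kits" with
        | none => rw [hg] at h; simp at h
        | some v =>
          rw [hg] at h
          simp only [Option.map_some, Option.some.injEq, Prod.mk.injEq] at h
          exact h.2.symm
      rw [hpop]
      unfold PySem.Dict.erase
      rw [PySem.Dict.keys_mk]
      exact hpre.1.sublist (List.filter_sublist.map Prod.fst)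
    show ((PySem.List.pyRange 0 count 1).foldl
          (fun st _ => pvCounterAdd st pkc) popped).items
        = (if 1 < count then
            pvCounterAdd (if 0 < count then pvCounterAdd popped pkc else popped)
              (PySem.Dict.mk (pkc.map (fun q => (q.1, (count - 1) * q.2)))).items
          else if 0 < count then pvCounterAdd popped pkc else popped).items
    by_cases hc : count ≤ 0
    · rw [pv_pyRange_nil count hc,
        if_neg (by omega : ¬ (1 : Int) < count), if_neg (by omega : ¬ (0 : Int) < count)]
      rfl
    · have hc' : 0 < count := by omega
      rw [pv_foldl_const, pv_pyRange_len count hc']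
      obtain ⟨n, hn⟩ : ∃ n, count.toNat = n + 1 := ⟨count.toNat - 1, by omega⟩
      rw [hn, pv_iter popped pkc n hsk hpre.2]
      by_cases h1 : 1 < count
      · rw [if_pos h1, if_pos hc']
        have hscaled : (PySem.Dict.mk (pkc.map (fun q => (q.1, (count - 1) * q.2)))).items
            = pkc.map (fun q => (q.1, (count - 1) * q.2)) := rfl
        rw [hscaled, pv_base popped pkc hsk hpre.2,
          pv_step_scaled popped pkc (count - 1) (by omega) hsk hpre.2]
        have he : (count - 1) + 1 = (n : Int) + 1 := by omega
        rw [he]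
      · -- count = 1
        have hce : count = 1 := by omega
        have hn0 : n = 0 := by omega
        subst hn0
        rw [if_neg h1, if_pos hc', pv_base popped pkc hsk hpre.2]
        norm_num
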